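-- pv_equiv track=rewrite | github.com/ivanberejnoi86/python_lessons | home_work_5.py | longest_name
-- ===== SOURCE A (Python) =====
-- def longest_name(input_arr):
--     long_name = []
--     names = []
--     for nameidx in range(len(input_arr)):
--         names.append(input_arr[nameidx]['name'])
--     longest = len(max(names, key=len))
--     for name in names:
--         if len(name) == longest:
--             long_name.append(name)
--
--     return long_name
-- ===== SOURCE B (Python) =====
-- def longest_name(input_arr):
--     # group names by length in one pass, then return the bucket of the max length
--     table = {}
--     for item in input_arr:
--         name = item['name']
--         table.setdefault(len(name), []).append(name)
--     return table[max(table)]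
-- ===== Notes on version B (the rewrite author's own statement) =====
-- stated objective: alternative
-- what changed: Instead of materialising a names list, taking max(names, key=len) and re-scanning with a filter, B groups the names into a dict keyed by length in one pass and returns the bucket at max(table).
import Mathlib
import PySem

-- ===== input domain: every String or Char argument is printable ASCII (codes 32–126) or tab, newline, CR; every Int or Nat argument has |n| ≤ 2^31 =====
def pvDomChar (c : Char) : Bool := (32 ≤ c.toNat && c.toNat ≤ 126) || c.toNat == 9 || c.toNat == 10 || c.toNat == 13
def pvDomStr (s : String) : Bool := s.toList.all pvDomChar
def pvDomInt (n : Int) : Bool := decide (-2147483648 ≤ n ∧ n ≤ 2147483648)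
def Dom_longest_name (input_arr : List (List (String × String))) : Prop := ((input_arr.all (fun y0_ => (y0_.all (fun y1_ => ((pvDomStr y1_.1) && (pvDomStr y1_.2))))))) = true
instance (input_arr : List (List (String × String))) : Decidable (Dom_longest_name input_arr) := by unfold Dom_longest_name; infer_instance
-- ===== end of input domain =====

-- B replaces A's two-pass "names list, max(names, key=len), filter" by one grouping pass into a
-- dict keyed by length, indexed at max(table); proved equal on Pre_ (alternative, same cost).

-- ===== PORT A =====
-- item['name'] : dict lookup (first match in the association list); "" is never read under Pre_
def pvName (item : List (String × String)) : String :=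
  (PySem.Dict.mk item).getD "name" ""

def longest_name (input_arr : List (List (String × String))) : List String :=
  -- names = []; for nameidx in range(len(input_arr)): names.append(input_arr[nameidx]['name'])
  let names := (PySem.List.pyRange 0 input_arr.length 1).foldl
    (fun acc nameidx => acc ++ [pvName (PySem.List.pyGetD input_arr nameidx [])]) []
  -- longest = len(max(names, key=len))  (ValueError on empty names: excluded by Pre_)
  match PySem.List.max? names PySem.Str.len with
  | none => []
  | some mx =>
    let longest := PySem.Str.len mx
    -- for name in names: if len(name) == longest: long_name.append(name)
    names.foldl (fun acc name => if PySem.Str.len name == longest then acc ++ [name] else acc) []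

-- ===== PORT B =====
def longest_name_alt (input_arr : List (List (String × String))) : List String :=
  -- table = {}; for item in input_arr: name = item['name']; table.setdefault(len(name), []).append(name)
  let table := input_arr.foldl
    (fun d item =>
      let name := pvName item
      d.modify (PySem.Str.len name) [] (· ++ [name]))
    PySem.Dict.empty
  -- return table[max(table)]   (ValueError on empty table: excluded by Pre_)
  match PySem.List.max? table.keys (fun k => k) with
  | none => []
  | some m => table.getD m []

-- ===== PRECONDITION & SPEC =====
-- Pre_: the input is nonempty (else max() raises ValueError) and every item has a 'name' key (else KeyError).
def Pre_longest_name (input_arr : List (List (String × String))) : Prop :=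
  input_arr ≠ [] ∧ ∀ item ∈ input_arr, "name" ∈ item.map Prod.fst
instance (input_arr : List (List (String × String))) : Decidable (Pre_longest_name input_arr) := by unfold Pre_longest_name; infer_instance

def pvWitness_longest_name : (List (List (String × String))) := [[("name", "bob")]]

def Spec_longest_name (input_arr : List (List (String × String))) (out : List String) : Prop := out = longest_name_alt input_arr
instance (input_arr : List (List (String × String))) (out : List String) : Decidable (Spec_longest_name input_arr out) := by unfold Spec_longest_name; infer_instance

-- ===== CLAIM (what is proved, stated in full; the proofs are below) =====
def Claim_equal_longest_name : Prop := ∀ (input_arr : List (List (String × String))), Dom_longest_name input_arr → Pre_longest_name input_arr → Spec_longest_name input_arr (longest_name input_arr)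

-- ===== LEMMAS AND PROOFS =====

-- A's first loop builds exactly the list of names.
theorem pvNamesA (xs : List (List (String × String))) :
    (PySem.List.pyRange 0 xs.length 1).foldl
      (fun acc i => acc ++ [pvName (PySem.List.pyGetD xs i [])]) []
    = xs.map pvName := by
  rw [PySem.List.foldl_append_singleton_eq_map]
  rw [show (fun i => pvName (PySem.List.pyGetD xs i [])) = pvName ∘ (fun i => PySem.List.pyGetD xs i []) from rfl]
  rw [← List.map_map]
  rw [show ((xs.length : Int)) = PySem.List.len xs from rfl]
  rw [PySem.List.map_pyGetD_pyRange_zero]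
  simp

-- B's table lookup at c is the sublist of names of length c, in input order.
theorem pvTableGetD (xs : List (List (String × String))) (c : Int) :
    (xs.foldl (fun d item => d.modify (PySem.Str.len (pvName item)) [] (· ++ [pvName item])) PySem.Dict.empty).getD c []
    = (xs.map pvName).filter (fun n => PySem.Str.len n == c) := by
  have h : xs.foldl (fun d item => d.modify (PySem.Str.len (pvName item)) [] (· ++ [pvName item])) PySem.Dict.empty
      = ((xs.map pvName).map (fun n => (PySem.Str.len n, n))).foldl (fun d p => d.modify p.1 [] (· ++ [p.2])) PySem.Dict.empty := by
    rw [List.map_map, List.foldl_map]; rfl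
  rw [h, PySem.Dict.getD_foldl_modify_append]
  rw [List.filter_map, List.map_map]
  simp [Function.comp_def]

-- B's key list holds exactly the distinct name lengths.
theorem pvTableKeys (xs : List (List (String × String))) :
    (xs.foldl (fun d item => d.modify (PySem.Str.len (pvName item)) [] (· ++ [pvName item])) PySem.Dict.empty).keys
    = PySem.Set.ofList (xs.map (fun item => PySem.Str.len (pvName item))) := by
  rw [PySem.Dict.keys_foldl_modify_key (key := fun item => PySem.Str.len (pvName item))]
  simp [PySem.Set.ofList_eq_foldl, PySem.Set.update]

-- ===== VERDICT (by name: the statement is the Claim_ definition above) =====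
theorem longest_name_spec : Claim_equal_longest_name := by
  intro xs _ hpre
  obtain ⟨hne, -⟩ := hpre
  unfold Spec_longest_name longest_name longest_name_alt
  simp only [pvNamesA, pvTableKeys]
  set names := xs.map pvName with hnames
  have hnn : names ≠ [] := by simp [hnames, hne]
  have hlens : (xs.map (fun item => PySem.Str.len (pvName item))) = names.map PySem.Str.len := by
    simp [hnames, List.map_map]
  rw [hlens]
  obtain ⟨mx, hmx⟩ : ∃ mx, PySem.List.max? names PySem.Str.len = some mx := by
    cases h : PySem.List.max? names PySem.Str.len with
    | none => exact absurd ((PySem.List.max?_eq_none_iff _ _).mp h) hnn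
    | some mx => exact ⟨mx, rfl⟩
  obtain ⟨m, hm⟩ : ∃ m, PySem.List.max? (PySem.Set.ofList (names.map PySem.Str.len)) (fun k => k) = some m := by
    cases h : PySem.List.max? (PySem.Set.ofList (names.map PySem.Str.len)) (fun k => k) with
    | none =>
      have hl := (PySem.List.max?_eq_none_iff _ _).mp h
      obtain ⟨n, hn⟩ := List.exists_mem_of_ne_nil names hnn
      have hmem0 : PySem.Str.len n ∈ PySem.Set.ofList (names.map PySem.Str.len) :=
        (PySem.Set.mem_ofList _ _).mpr (List.mem_map.mpr ⟨n, hn, rfl⟩)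
      rw [hl] at hmem0
      simp at hmem0
    | some m => exact ⟨m, rfl⟩
  rw [hmx, hm]
  simp only [pvTableGetD]
  have hA_mem := PySem.List.max?_mem hmx
  have hA_max := PySem.List.max?_isMax hmx
  have hB_mem := PySem.List.max?_mem hm
  have hB_max := PySem.List.max?_isMax hm
  have hmem : m ∈ names.map PySem.Str.len := (PySem.Set.mem_ofList _ _).mp hB_mem
  obtain ⟨n', hn', hmn⟩ := List.mem_map.mp hmem
  have h1 : m ≤ PySem.Str.len mx := hmn ▸ hA_max n' hn'
  have h2 : PySem.Str.len mx ≤ m :=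
    hB_max _ ((PySem.Set.mem_ofList _ _).mpr (List.mem_map.mpr ⟨mx, hA_mem, rfl⟩))
  have hEq : m = PySem.Str.len mx := le_antisymm h1 h2
  rw [PySem.List.foldl_append_if_eq_filter, hEq]
  simp [hnames]
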